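-- pv_equiv track=rewrite | github.com/YashThombare02/Phishing-App | backend/app.py | _count_repeating_characters
-- ===== SOURCE A (Python) =====
-- def _count_repeating_characters(text):
--     """Count sequences of repeating characters (e.g., 'aaa' or '111')"""
--     if not text or len(text) < 2:
--         return 0
--
--     text = text.lower()
--     repeat_count = 0
--     current_char = text[0]
--     streak = 1
--
--     for i in range(1, len(text)):
--         if text[i] == current_char:
--             streak += 1
--         else:
--             if streak >= 3:  # Consider 3+ repeating chars as suspicious
--                 repeat_count += 1
--             current_char = text[i]
--             streak = 1
--
--     # Check for streak at the end
--     if streak >= 3: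
--         repeat_count += 1
--
--     return repeat_count
-- ===== SOURCE B (Python) =====
-- def _count_repeating_characters(text):
--     """Count sequences of repeating characters (e.g., 'aaa' or '111')"""
--     if not text or len(text) < 2:
--         return 0
--     t = text.lower()
--     return sum(1 for i in range(len(t) - 2)
--                if t[i] == t[i + 1] == t[i + 2] and (i == 0 or t[i - 1] != t[i]))
-- ===== Notes on version B (the rewrite author's own statement) =====
-- stated objective: alternative
-- what changed: Replaces A's streak-counter state machine (current_char/streak with an end-of-loop flush) by a stateless positional count: sum over positions i of an indicator that i starts a maximal run of 3+ equal characters (t[i]==t[i+1]==t[i+2] and the previous character differs).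
import Mathlib
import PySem

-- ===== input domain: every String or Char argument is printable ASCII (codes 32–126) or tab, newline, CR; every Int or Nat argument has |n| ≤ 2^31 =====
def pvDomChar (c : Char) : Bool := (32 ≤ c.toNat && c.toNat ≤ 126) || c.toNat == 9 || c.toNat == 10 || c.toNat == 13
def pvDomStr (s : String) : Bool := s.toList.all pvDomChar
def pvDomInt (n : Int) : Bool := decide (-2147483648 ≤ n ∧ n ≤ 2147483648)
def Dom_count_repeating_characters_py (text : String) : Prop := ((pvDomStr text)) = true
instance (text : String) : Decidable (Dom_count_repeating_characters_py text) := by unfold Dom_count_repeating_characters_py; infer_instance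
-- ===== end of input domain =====

-- B replaces A's streak-counter state machine by a stateless positional count of
-- run starts: positions i with t[i]=t[i+1]=t[i+2] whose previous character differs
-- (alternative decomposition, same cost).

-- ===== PORT A =====
-- the for-loop over range(1, len(text)): state (current_char, streak, repeat_count), one step per text[i]
def pvALoop : List Char → Char → Int → Int → (Char × Int × Int)
  | [], c, streak, k => (c, streak, k)
  | x :: rest, c, streak, k =>
    if x = c then pvALoop rest c (streak + 1) k
    else pvALoop rest x 1 (if streak ≥ 3 then k + 1 else k)

def count_repeating_characters_py (text : String) : Int :=
  let l := (PySem.Str.lower text).toList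
  if l.length < 2 then 0
  else
    match l with
    | [] => 0
    | c0 :: rest =>
      let r := pvALoop rest c0 1 0          -- r = (current_char, streak, repeat_count)
      if r.2.1 ≥ 3 then r.2.2 + 1 else r.2.2  -- final streak flush

-- ===== PORT B =====
-- the indicator under Source B's comprehension: t[i] == t[i+1] == t[i+2] and (i == 0 or t[i-1] != t[i])
def pvBPred (t : List Char) (i : Nat) : Bool :=
  t.getD i ' ' == t.getD (i + 1) ' ' && t.getD (i + 1) ' ' == t.getD (i + 2) ' '
    && (i == 0 || t.getD (i - 1) ' ' != t.getD i ' ')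

-- sum(1 for i in range(len(t) - 2) if <indicator>)
def count_repeating_characters_py_alt (text : String) : Int :=
  let t := (PySem.Str.lower text).toList
  if t.length < 2 then 0
  else ((List.range (t.length - 2)).countP (pvBPred t) : Int)

-- ===== PRECONDITION & SPEC =====
def Spec_count_repeating_characters_py (text : String) (out : Int) : Prop := out = count_repeating_characters_py_alt text
instance (text : String) (out : Int) : Decidable (Spec_count_repeating_characters_py text out) := by unfold Spec_count_repeating_characters_py; infer_instance

-- ===== CLAIM (what is proved, stated in full; the proofs are below) =====
def Claim_equal_count_repeating_characters_py : Prop := ∀ (text : String), Dom_count_repeating_characters_py text → Spec_count_repeating_characters_py text (count_repeating_characters_py text)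

-- ===== LEMMAS AND PROOFS =====

theorem pv_beq_decide (a d : Char) : (a == d) = decide (a = d) := by
  by_cases h : a = d <;> simp [h]

theorem pv_bne_decide (a d : Char) : (a != d) = !decide (a = d) := by
  by_cases h : a = d <;> simp [h]

-- common yardstick: count of maximal runs of length ≥ 3, by run decomposition
def pvRunCount : List Char → Int
  | [] => 0
  | x :: rest =>
    (if (1 : Int) + (rest.takeWhile (fun y => y = x)).length ≥ 3 then 1 else 0)
      + pvRunCount (rest.dropWhile (fun y => y = x))
termination_by l => l.length
decreasing_by
  simp only [List.length_cons]
  exact Nat.lt_succ_of_le (List.length_dropWhile_le _ _)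

-- B's comprehension, as a structural sliding 3-window recursion with explicit prev
def pvWinF : Option Char → List Char → Int
  | p, a :: b :: d :: rest =>
    (if a = b ∧ b = d ∧ some a ≠ p then 1 else 0) + pvWinF (some a) (b :: d :: rest)
  | _, _ => 0

-- generalisation of pvBPred with an explicit virtual previous character
def pvGWin (p : Option Char) (t : List Char) (i : Nat) : Bool :=
  t.getD i ' ' == t.getD (i + 1) ' ' && t.getD (i + 1) ' ' == t.getD (i + 2) ' '
    && (if i = 0 then decide (some (t.getD 0 ' ') ≠ p) else t.getD (i - 1) ' ' != t.getD i ' ')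

theorem pvBPred_eq_gwin (t : List Char) (i : Nat) : pvBPred t i = pvGWin none t i := by
  cases i <;> simp [pvBPred, pvGWin]

-- ---- A side: the streak loop with final flush equals pvRunCount ----

theorem pvALoop_step_eq (y : Char) (r : List Char) (s k : Int) :
    pvALoop (y :: r) y s k = pvALoop r y (s + 1) k := by
  simp [pvALoop]

theorem pvALoop_step_ne (y c : Char) (r : List Char) (s k : Int) (h : ¬ y = c) :
    pvALoop (y :: r) c s k = pvALoop r y 1 (if s ≥ 3 then k + 1 else k) := by
  simp [pvALoop, h]

theorem pvALoop_flush : ∀ (rest : List Char) (c : Char) (s k : Int),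
    (if (pvALoop rest c s k).2.1 ≥ 3 then (pvALoop rest c s k).2.2 + 1 else (pvALoop rest c s k).2.2)
      = (if s + ((rest.takeWhile (fun y => y = c)).length : Int) ≥ 3 then k + 1 else k)
          + pvRunCount (rest.dropWhile (fun y => y = c)) := by
  intro rest
  induction rest with
  | nil => intro c s k; simp [pvALoop, pvRunCount]
  | cons y r ih =>
    intro c s k
    by_cases h : y = c
    · subst h
      rw [pvALoop_step_eq, ih]
      simp only [List.takeWhile_cons, decide_true, List.dropWhile_cons]
      have hh : ∀ n : Nat, (s + 1) + (n : Int) = s + ((n + 1 : Nat) : Int) := by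
        intro n; push_cast; ring
      rw [hh]
      simp
    · rw [pvALoop_step_ne _ _ _ _ _ h, ih]
      simp only [List.takeWhile_cons, List.dropWhile_cons, decide_eq_true_eq, h, if_false,
        List.length_nil, Nat.cast_zero, add_zero]
      rw [show pvRunCount (y :: r)
            = (if (1 : Int) + ((r.takeWhile (fun z => z = y)).length : Int) ≥ 3 then 1 else 0)
                + pvRunCount (r.dropWhile (fun z => z = y)) from by rw [pvRunCount]]
      split_ifs <;> ring

theorem pvA_eq_runCount : ∀ (l : List Char),
    (if l.length < 2 then (0 : Int)
     else match l with
       | [] => 0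
       | c0 :: rest =>
         if (pvALoop rest c0 1 0).2.1 ≥ 3 then (pvALoop rest c0 1 0).2.2 + 1
         else (pvALoop rest c0 1 0).2.2)
      = (if l.length < 2 then 0 else pvRunCount l) := by
  intro l
  by_cases hlen : l.length < 2
  · simp [hlen]
  · simp only [hlen, if_false]
    match l with
    | [] => simp at hlen
    | c0 :: rest =>
      show (if (pvALoop rest c0 1 0).2.1 ≥ 3 then (pvALoop rest c0 1 0).2.2 + 1
            else (pvALoop rest c0 1 0).2.2) = pvRunCount (c0 :: rest)
      rw [pvALoop_flush rest c0 1 0]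
      rw [show pvRunCount (c0 :: rest)
            = (if (1 : Int) + ((rest.takeWhile (fun z => z = c0)).length : Int) ≥ 3 then 1 else 0)
                + pvRunCount (rest.dropWhile (fun z => z = c0)) from by rw [pvRunCount]]
      split_ifs <;> ring

-- ---- B side, step 1: index count equals the structural window recursion ----

theorem pvGWin_shift (p : Option Char) (a : Char) (t : List Char) (i : Nat) :
    pvGWin p (a :: t) (i + 1) = pvGWin (some a) t i := by
  cases i with
  | zero => simp [pvGWin, pv_bne_decide, eq_comm]
  | succ j => simp [pvGWin]

theorem pvIdx_eq_winF : ∀ (t : List Char) (p : Option Char),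
    ((List.range (t.length - 2)).countP (pvGWin p t) : Int) = pvWinF p t := by
  intro t
  induction t with
  | nil => intro p; simp [pvWinF]
  | cons a t ih =>
    intro p
    match t with
    | [] => simp [pvWinF]
    | [b] => simp [pvWinF]
    | b :: d :: r =>
      have hlen : (a :: b :: d :: r).length - 2 = (b :: d :: r).length - 2 + 1 := by
        simp
      rw [hlen, List.range_succ_eq_map, List.countP_cons]
      have hmap : ((List.range ((b :: d :: r).length - 2)).map Nat.succ).countP (pvGWin p (a :: b :: d :: r))
          = (List.range ((b :: d :: r).length - 2)).countP (pvGWin (some a) (b :: d :: r)) := by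
        rw [List.countP_map]
        apply List.countP_congr
        intro i _
        rw [Function.comp_apply, pvGWin_shift]
      rw [hmap]
      have h0 : pvGWin p (a :: b :: d :: r) 0
          = decide (a = b ∧ b = d ∧ some a ≠ p) := by
        simp only [pvGWin, List.getD_cons_zero, List.getD_cons_succ,
          pv_beq_decide]
        by_cases h1 : a = b <;> by_cases h2 : b = d <;> by_cases h3 : some a = p <;>
          simp [h1, h2, h3]
      rw [show pvWinF p (a :: b :: d :: r)
            = (if a = b ∧ b = d ∧ some a ≠ p then 1 else 0) + pvWinF (some a) (b :: d :: r)
          from by rw [pvWinF]]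
      rw [← ih (some a)]
      push_cast [h0]
      by_cases hc : a = b ∧ b = d ∧ some a ≠ p <;> simp [hc] <;> ring

-- ---- B side, step 2: the window recursion equals pvRunCount ----

-- sliding past a repeated character never fires the window
theorem pvWinF_skip (a : Char) (l : List Char) :
    pvWinF (some a) (a :: l) = pvWinF (some a) l := by
  match l with
  | [] => simp [pvWinF]
  | [b] => simp [pvWinF]
  | b :: d :: r => simp [pvWinF]

theorem pvWinF_strip : ∀ (l : List Char) (a : Char),
    pvWinF (some a) l = pvWinF (some a) (l.dropWhile (fun y => y = a)) := by
  intro l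
  induction l with
  | nil => intro a; simp
  | cons x r ih =>
    intro a
    by_cases h : x = a
    · subst h
      rw [pvWinF_skip, ih]
      simp
    · simp [h]

-- consuming one maximal run: window count = indicator of run length ≥ 3 + rest
theorem pvWinF_run (rest : List Char) (a : Char) (p : Option Char) (hp : some a ≠ p) :
    pvWinF p (a :: rest)
      = (if (1 : Int) + ((rest.takeWhile (fun y => y = a)).length : Int) ≥ 3 then 1 else 0)
          + pvWinF (some a) (rest.dropWhile (fun y => y = a)) := by
  match rest with
  | [] => simp [pvWinF]
  | [y] =>
    by_cases h : y = a <;>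
      simp [pvWinF, h]
  | y :: d :: r' =>
    by_cases h : y = a
    · subst h
      -- run continues: pull off the first window, then strip the rest of the run
      rw [show pvWinF p (y :: y :: d :: r')
            = (if y = y ∧ y = d ∧ some y ≠ p then 1 else 0) + pvWinF (some y) (y :: d :: r')
          from by rw [pvWinF]]
      rw [pvWinF_strip (y :: d :: r') y]
      have hdw : (y :: d :: r').dropWhile (fun z => z = y)
          = (d :: r').dropWhile (fun z => z = y) := by
        simp [List.dropWhile_cons]
      rw [hdw]
      congr 1
      -- indicators agree
      by_cases hd : d = y
      · have hlen : (1 : Int) + (((y :: d :: r').takeWhile (fun z => z = y)).length : Int) ≥ 3 := by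
          simp [hd]
          omega
        rw [if_pos hlen]
        simp [hd, hp]
      · have h1 : ¬ (y = d) := fun hh => hd hh.symm
        have hlen : ¬ ((1 : Int) + (((y :: d :: r').takeWhile (fun z => z = y)).length : Int) ≥ 3) := by
          simp [hd]
        rw [if_neg hlen]
        simp [h1]
    · -- run of length exactly 1
      have h1 : ¬ (a = y) := fun hh => h hh.symm
      rw [show pvWinF p (a :: y :: d :: r')
            = (if a = y ∧ y = d ∧ some a ≠ p then 1 else 0) + pvWinF (some a) (y :: d :: r')
          from by rw [pvWinF]]
      simp [h, h1]

-- the head of dropWhile fails the predicate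
theorem pv_head_dropWhile {α : Type} (q : α → Bool) :
    ∀ (l : List α) (x : α), (l.dropWhile q).head? = some x → q x = false := by
  intro l
  induction l with
  | nil => intro x hx; simp at hx
  | cons a r ih =>
    intro x hx
    by_cases h : q a
    · rw [List.dropWhile_cons, if_pos h] at hx
      exact ih x hx
    · rw [List.dropWhile_cons, if_neg h] at hx
      simp at hx
      rw [← hx]
      simpa using h

theorem pvWinF_eq_runCount : ∀ (l : List Char) (p : Option Char),
    (∀ a, l.head? = some a → some a ≠ p) → pvWinF p l = pvRunCount l := by
  intro l
  induction l using pvRunCount.induct with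
  | case1 => intro p _; simp [pvWinF, pvRunCount]
  | case2 x rest ih =>
    intro p hp
    rw [pvWinF_run rest x p (hp x rfl)]
    rw [show pvRunCount (x :: rest)
          = (if (1 : Int) + ((rest.takeWhile (fun y => y = x)).length : Int) ≥ 3 then 1 else 0)
              + pvRunCount (rest.dropWhile (fun y => y = x))
        from by rw [pvRunCount]]
    congr 1
    apply ih
    intro b hb hcontra
    have hq := pv_head_dropWhile (fun y => y = x) rest b hb
    simp at hq
    exact hq (Option.some.inj hcontra)

-- ---- assembly ----

theorem pv_final (l : List Char) :
    (if l.length < 2 then (0 : Int)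
     else match l with
       | [] => 0
       | c0 :: rest =>
         if (pvALoop rest c0 1 0).2.1 ≥ 3 then (pvALoop rest c0 1 0).2.2 + 1
         else (pvALoop rest c0 1 0).2.2)
      = (if l.length < 2 then 0 else ((List.range (l.length - 2)).countP (pvBPred l) : Int)) := by
  rw [pvA_eq_runCount]
  by_cases h : l.length < 2
  · simp [h]
  · simp only [h, if_false]
    have hc : (List.range (l.length - 2)).countP (pvBPred l)
        = (List.range (l.length - 2)).countP (pvGWin none l) := by
      apply List.countP_congr
      intro i _
      rw [pvBPred_eq_gwin]
    rw [hc, pvIdx_eq_winF l none]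
    exact (pvWinF_eq_runCount l none (fun a _ => by simp)).symm

-- ===== VERDICT (by name: the statement is the Claim_ definition above) =====
theorem count_repeating_characters_py_spec : Claim_equal_count_repeating_characters_py := by
  intro text _
  unfold Spec_count_repeating_characters_py count_repeating_characters_py
    count_repeating_characters_py_alt
  exact pv_final ((PySem.Str.lower text).toList)
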